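-- pv_equiv track=rewrite | github.com/almamuncsit/HackerRank | Contest/hack-the-interview-ii-global/1.py | maxScore
-- ===== SOURCE A (Python) =====
-- from collections import defaultdict
--
-- def maxScore(a, m):
--     a.sort()
--     products = defaultdict(list)
--     for i in range(len(a)):
--         key = (i // m) + 1
--         products[key].append(a[i])
--     last_key = ((len(a) - 1) // m) + 1
--     if len(products[last_key]) < m:
--         products[last_key - 1].extend(products[last_key])
--         del products[last_key]
--     score = 0
--     c = (10 ** 9) + 7
--     for item in products.items():
--         score += item[0] * sum(item[1])
--     return score % c
-- ===== SOURCE B (Python) =====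
-- def maxScore(a, m):
--     # reverse sweep: the running suffix sum is added once at each full-group boundary
--     a.sort()
--     n = len(a)
--     acc = 0
--     score = 0
--     for i in range(n - 1, -1, -1):
--         acc += a[i]
--         if i % m == 0 and i + m <= n:
--             score += acc
--     return score % (10 ** 9 + 7)
-- ===== Notes on version B (the rewrite author's own statement) =====
-- stated objective: alternative
-- what changed: B drops A's dict-of-groups and per-group weighted sums entirely: it sweeps the sorted array from the right keeping a running suffix sum and adds that suffix sum to the score once at each full-group boundary (indices i with i % m == 0 and i + m <= n), which yields the same weighted total without ever computing a group or a weight.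
-- outside the precondition, e.g. on maxScore([1, 2], -2): A returns 1, B returns 3
import Mathlib
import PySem

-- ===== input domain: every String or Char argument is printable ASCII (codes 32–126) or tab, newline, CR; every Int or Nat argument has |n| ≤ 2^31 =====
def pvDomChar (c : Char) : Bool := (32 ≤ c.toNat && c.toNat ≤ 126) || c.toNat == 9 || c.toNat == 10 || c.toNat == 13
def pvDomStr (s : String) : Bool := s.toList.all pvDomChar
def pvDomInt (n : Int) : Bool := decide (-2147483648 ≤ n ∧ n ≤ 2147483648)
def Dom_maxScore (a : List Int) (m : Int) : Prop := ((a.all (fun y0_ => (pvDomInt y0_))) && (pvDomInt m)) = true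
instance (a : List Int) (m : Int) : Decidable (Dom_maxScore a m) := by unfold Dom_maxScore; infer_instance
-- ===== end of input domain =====

-- B replaces A's dict-of-groups by a reverse sweep adding the running suffix sum at each full-group
-- boundary (objective: alternative algorithm, same asymptotic cost).
-- Python A sorts `a` in place; Python B performs the same `a.sort()` mutation; the theorems below are about the return value.

-- ===== PORT A =====
def maxScore (a : List Int) (m : Int) : Int :=
  let s := PySem.List.sorted a (fun x => x) false
  -- products = defaultdict(list); for i in range(len(a)): products[(i // m) + 1].append(a[i])
  let products : PySem.Dict Int (List Int) :=
    (PySem.List.pyRange 0 (PySem.List.len s) 1).foldl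
      (fun d i => d.modify (PySem.Int.floordiv i m + 1) [] (fun g => g ++ [PySem.List.pyGetD s i 0]))
      PySem.Dict.empty
  let lastKey := PySem.Int.floordiv (PySem.List.len s - 1) m + 1
  -- reading products[last_key] on a defaultdict creates the (possibly empty) entry:
  let lastList := products.getD lastKey []
  let products := products.setdefault lastKey []
  let products :=
    if ((lastList.length : Int)) < m then
      -- products[last_key - 1].extend(products[last_key]); del products[last_key]
      (products.modify (lastKey - 1) [] (fun g => g ++ lastList)).erase lastKey
    else products
  let score := products.items.foldl (fun sc it => sc + it.1 * it.2.sum) 0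
  PySem.Int.mod score (10 ^ 9 + 7)

-- ===== PORT B =====
def maxScore_alt (a : List Int) (m : Int) : Int :=
  let s := PySem.List.sorted a (fun x => x) false
  let n : Int := PySem.List.len s
  -- acc, score = 0, 0; for i in range(n-1, -1, -1): acc += a[i]; if i % m == 0 and i + m <= n: score += acc
  let st := (PySem.List.pyRange (n - 1) (-1) (-1)).foldl
    (fun p i =>
      (p.1 + PySem.List.pyGetD s i 0,
       if PySem.Int.mod i m = 0 ∧ i + m ≤ n then p.2 + (p.1 + PySem.List.pyGetD s i 0) else p.2))
    (0, 0)
  PySem.Int.mod st.2 (10 ^ 9 + 7)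

-- ===== PRECONDITION & SPEC =====
-- Pre_ restricts to a positive group size m, the natural domain: m = 0 makes Python A raise
-- ZeroDivisionError, and for negative m A returns meaningless floor-division artefacts (see cites).
def Pre_maxScore (a : List Int) (m : Int) : Prop := 1 ≤ m
instance (a : List Int) (m : Int) : Decidable (Pre_maxScore a m) := by unfold Pre_maxScore; infer_instance
def pvWitness_maxScore : List Int × Int := ([3, 1, 2], 2)

def Spec_maxScore (a : List Int) (m : Int) (out : Int) : Prop := out = maxScore_alt a m
instance (a : List Int) (m : Int) (out : Int) : Decidable (Spec_maxScore a m out) := by unfold Spec_maxScore; infer_instance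

-- ===== CLAIM (what is proved, stated in full; the proofs are below) =====
def Claim_equal_maxScore : Prop := ∀ (a : List Int) (m : Int), Dom_maxScore a m → Pre_maxScore a m → Spec_maxScore a m (maxScore a m)

-- ===== LEMMAS AND PROOFS =====

-- weighted sum of a grouping dict: score = Σ key * sum(values)
def pvFsum (d : PySem.Dict Int (List Int)) : Int :=
  (d.items.map (fun q => q.1 * q.2.sum)).sum

theorem pv_repl_sum (l : List (Int × List Int)) (k : Int) (u v : List Int)
    (hnd : (l.map Prod.fst).Nodup)
    (hfind : l.find? (fun p => p.1 == k) = some (k, u)) :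
    ((l.map (fun p => if p.1 == k then (k, u ++ v) else p)).map (fun q => q.1 * q.2.sum)).sum
      = (l.map (fun q => q.1 * q.2.sum)).sum + k * v.sum := by
  induction l with
  | nil => simp at hfind
  | cons p t ih =>
    simp only [List.map_cons, List.nodup_cons] at hnd
    by_cases h : p.1 = k
    · have hf : p = (k, u) := by
        rw [List.find?_cons_of_pos (by simp [h])] at hfind
        exact (Option.some.injEq _ _).mp hfind
      subst hf
      have ht : t.map (fun p : Int × List Int => if p.1 == k then (k, u ++ v) else p) = t := by
        calc t.map (fun p : Int × List Int => if p.1 == k then (k, u ++ v) else p)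
            = t.map id := by
              apply List.map_congr_left
              intro q hq
              have hne : q.1 ≠ k := by
                intro hqe
                exact hnd.1 (by simpa [hqe] using (List.mem_map_of_mem hq : q.1 ∈ t.map Prod.fst))
              simp [hne]
          _ = t := List.map_id t
      simp only [List.map_cons, List.sum_cons, if_pos (by simp : ((k, u).1 == k) = true), ht]
      simp [List.sum_append]
      ring
    · rw [List.find?_cons_of_neg (by simp [h])] at hfind
      simp only [List.map_cons, List.sum_cons, if_neg (by simp [h] : ¬ ((p.1 == k) = true))]
      rw [ih hnd.2 hfind]
      ring

theorem pv_nodup_modify {d : PySem.Dict Int (List Int)} (hnd : d.keys.Nodup)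
    (k : Int) (v0 : List Int) (f : List Int → List Int) :
    (d.modify k v0 f).keys.Nodup := by
  have := PySem.Dict.nodup_keys_foldl_modify_key [()] (fun _ => k) v0 (fun _ _ g => f g) d hnd
  simpa using this

theorem pv_fsum_modify_append (d : PySem.Dict Int (List Int)) (hnd : d.keys.Nodup)
    (k : Int) (v : List Int) :
    pvFsum (d.modify k [] (fun g => g ++ v)) = pvFsum d + k * v.sum := by
  by_cases hc : d.contains k = true
  · -- existing key: insert replaces in place
    have hfind : d.items.find? (fun p => p.1 == k) = some (k, d.getD k []) := by
      have hw : (d.get? k).isSome := by rw [← PySem.Dict.contains_eq_isSome_get?]; exact hc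
      simp only [PySem.Dict.get?, Option.isSome_map] at hw
      rcases Option.isSome_iff_exists.mp hw with ⟨pr, hpr⟩
      have h1 : pr.1 = k := by
        have := List.find?_some hpr
        simpa using this
      have : d.getD k [] = pr.2 := by
        simp [PySem.Dict.getD, PySem.Dict.get?, hpr]
      rw [this]
      have : (k, pr.2) = pr := by rw [← h1]
      rw [this]
      exact hpr
    have hmod : (d.modify k [] (fun g => g ++ v)).items
        = d.items.map (fun p => if p.1 == k then (k, d.getD k [] ++ v) else p) := by
      simp only [PySem.Dict.modify]
      exact PySem.Dict.items_insert_of_contains d _ hc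
    unfold pvFsum
    rw [hmod, pv_repl_sum d.items k (d.getD k []) v (by simpa [PySem.Dict.keys] using hnd) hfind]
  · have hcf : d.contains k = false := by simpa using hc
    have hmod : (d.modify k [] (fun g => g ++ v)).items = d.items ++ [(k, v)] := by
      have hg : d.getD k [] = ([] : List Int) := PySem.Dict.getD_of_not_contains d ([] : List Int) hcf
      simp only [PySem.Dict.modify, hg, List.nil_append]
      exact PySem.Dict.items_insert_of_not_contains d v hcf
    unfold pvFsum
    rw [hmod]
    simp

theorem pv_fsum_fold (l : List (Int × Int)) (d : PySem.Dict Int (List Int)) (hnd : d.keys.Nodup) :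
    pvFsum (l.foldl (fun d p => d.modify p.1 [] (fun g => g ++ [p.2])) d)
      = pvFsum d + (l.map (fun p => p.1 * p.2)).sum := by
  induction l generalizing d with
  | nil => simp
  | cons p t ih =>
    simp only [List.foldl_cons, List.map_cons, List.sum_cons]
    rw [ih _ (pv_nodup_modify hnd _ _ _), pv_fsum_modify_append d hnd]
    simp; ring

theorem pv_erase_sum (l : List (Int × List Int)) (k : Int)
    (hnd : (l.map Prod.fst).Nodup) :
    ((l.filter (fun p => !(p.1 == k))).map (fun q => q.1 * q.2.sum)).sum
      = (l.map (fun q => q.1 * q.2.sum)).sum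
        - k * (((l.find? (fun p => p.1 == k)).map (fun p => p.2)).getD []).sum := by
  induction l with
  | nil => simp
  | cons p t ih =>
    simp only [List.map_cons, List.nodup_cons] at hnd
    by_cases h : p.1 = k
    · have hfil : t.filter (fun p => !(p.1 == k)) = t := by
        apply List.filter_eq_self.mpr
        intro q hq
        have hne : q.1 ≠ k := by
          intro hqe
          exact hnd.1 (by simpa [hqe, ← h] using (List.mem_map_of_mem hq : q.1 ∈ t.map Prod.fst))
        simp [hne]
      rw [List.filter_cons_of_neg (by simp [h]), List.find?_cons_of_pos (by simp [h]), hfil]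
      simp [h]
    · rw [List.filter_cons_of_pos (by simp [h]), List.find?_cons_of_neg (by simp [h])]
      simp only [List.map_cons, List.sum_cons, ih hnd.2]
      ring

theorem pv_fsum_erase (d : PySem.Dict Int (List Int)) (hnd : d.keys.Nodup) (k : Int) :
    pvFsum (d.erase k) = pvFsum d - k * (d.getD k []).sum := by
  unfold pvFsum
  simp only [PySem.Dict.erase, PySem.Dict.getD, PySem.Dict.get?]
  exact pv_erase_sum d.items k (by simpa [PySem.Dict.keys] using hnd)

theorem pv_sum_map_ite_sub (l : List Int) (p : Int → Prop) [DecidablePred p] (f g : Int → Int) :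
    (l.map (fun i => if p i then f i - g i else f i)).sum
      = (l.map f).sum - ((l.filter (fun i => decide (p i))).map g).sum := by
  induction l with
  | nil => simp
  | cons x t ih =>
    by_cases h : p x
    · rw [List.filter_cons_of_pos (by simp [h])]
      simp only [List.map_cons, List.sum_cons, if_pos h, ih]
      ring
    · rw [List.filter_cons_of_neg (by simp [h])]
      simp only [List.map_cons, List.sum_cons, if_neg h, ih]
      ring

-- condition arithmetic: for 0 < m, q = (n-1)//m :  n - q*m < m  ↔  n % m ≠ 0
theorem pv_cond_arith (n m : Int) (hm : 0 < m) :
    (n - PySem.Int.floordiv (n-1) m * m < m) ↔ PySem.Int.mod n m ≠ 0 := by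
  set q := PySem.Int.floordiv (n-1) m with hqdef
  have hbr : q * m ≤ n - 1 ∧ n - 1 < (q + 1) * m :=
    (PySem.Int.floordiv_eq_iff_of_pos hm).mp hqdef.symm
  set f := PySem.Int.floordiv n m with hfdef
  have hfr : f * m + PySem.Int.mod n m = n := PySem.Int.floordiv_mul_add_mod n m
  have hr0 : 0 ≤ PySem.Int.mod n m := PySem.Int.mod_nonneg n hm
  have hr1 : PySem.Int.mod n m < m := PySem.Int.mod_lt n hm
  set r0 := PySem.Int.mod n m
  have hexp : (q + 1) * m = q * m + m := by ring
  have hk0 : 0 ≤ f - q := by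
    by_contra hcon
    have h1 : f * m ≤ (q - 1) * m :=
      mul_le_mul_of_nonneg_right (by omega) (le_of_lt hm)
    have h2 : (q - 1) * m = q * m - m := by ring
    omega
  have hk1 : f - q ≤ 1 := by
    by_contra hcon
    have h1 : (q + 2) * m ≤ f * m :=
      mul_le_mul_of_nonneg_right (by omega) (le_of_lt hm)
    have h2 : (q + 2) * m = q * m + m + m := by ring
    omega
  have hfq : f = q ∨ f = q + 1 := by omega
  rcases hfq with h | h
  · rw [h] at hfr; omega
  · rw [h, hexp] at hfr; omega

-- ===== B-side machinery: the reverse sweep as a per-element weight sum =====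

-- score contribution of processing the (still unprocessed, increasing) index list l with suffix acc
def pvW (s : List Int) (m n : Int) : List Int → Int → Int
  | [], _ => 0
  | i :: t, acc =>
      pvW s m n t acc +
        (if PySem.Int.mod i m = 0 ∧ i + m ≤ n then
          acc + (PySem.List.pyGetD s i 0 + (t.map (fun j => PySem.List.pyGetD s j 0)).sum) else 0)

-- same total, accumulated left-to-right with a running boundary counter k
def pvU (s : List Int) (m n : Int) : List Int → Int → Int
  | [], _ => 0
  | j :: t, k =>
      (k + (if PySem.Int.mod j m = 0 ∧ j + m ≤ n then (1:Int) else 0)) * PySem.List.pyGetD s j 0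
        + pvU s m n t (k + (if PySem.Int.mod j m = 0 ∧ j + m ≤ n then (1:Int) else 0))

-- number of full-group boundaries below x, in closed form
def pvF (m n x : Int) : Int :=
  if x ≤ 0 ∨ n < m then 0 else PySem.Int.floordiv (min (x-1) (n-m)) m + 1

theorem pv_mul_lt (m a b : Int) (hm : 0 < m) (h : a * m < b * m) : a < b :=
  lt_of_mul_lt_mul_right h (le_of_lt hm)

theorem pv_fold_rev (s : List Int) (m n : Int) (l : List Int) (acc sc : Int) :
    l.reverse.foldl
      (fun p i =>
        (p.1 + PySem.List.pyGetD s i 0,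
         if PySem.Int.mod i m = 0 ∧ i + m ≤ n then p.2 + (p.1 + PySem.List.pyGetD s i 0) else p.2))
      (acc, sc)
    = (acc + (l.map (fun j => PySem.List.pyGetD s j 0)).sum, sc + pvW s m n l acc) := by
  induction l with
  | nil => simp [pvW]
  | cons i t ih =>
    rw [List.reverse_cons, List.foldl_append, ih]
    simp only [List.foldl_cons, List.foldl_nil, pvW, List.map_cons, List.sum_cons]
    split_ifs with h
    · simp only [Prod.mk.injEq]; constructor <;> ring
    · simp only [Prod.mk.injEq]; constructor <;> ring

theorem pv_U_eq (s : List Int) (m n : Int) (l : List Int) :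
    ∀ k, pvU s m n l k = pvW s m n l 0 + k * (l.map (fun j => PySem.List.pyGetD s j 0)).sum := by
  induction l with
  | nil => intro k; simp [pvU, pvW]
  | cons j t ih =>
    intro k
    simp only [pvU, pvW, List.map_cons, List.sum_cons, ih]
    split_ifs with h <;> ring

theorem pv_fd_step (m x : Int) (hm : 1 ≤ m) :
    PySem.Int.floordiv x m
      = PySem.Int.floordiv (x-1) m + (if PySem.Int.mod x m = 0 then (1:Int) else 0) := by
  have hmpos : (0:Int) < m := by omega
  have hqr := PySem.Int.floordiv_mul_add_mod x m
  have hr0 := PySem.Int.mod_nonneg x hmpos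
  have hr1 := PySem.Int.mod_lt x hmpos
  set q := PySem.Int.floordiv x m with hq
  set r := PySem.Int.mod x m with hrr
  by_cases h : r = 0
  · rw [if_pos h]
    have hprev : PySem.Int.floordiv (x-1) m = q - 1 := by
      rw [PySem.Int.floordiv_eq_iff_of_pos hmpos]
      constructor
      · have e1 : (q - 1) * m = q * m - m := by ring
        linarith
      · have e2 : (q - 1 + 1) * m = q * m := by ring
        linarith
    omega
  · rw [if_neg h]
    have hprev : PySem.Int.floordiv (x-1) m = q := by
      rw [PySem.Int.floordiv_eq_iff_of_pos hmpos]
      constructor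
      · have h1 : (1:Int) ≤ r := by omega
        linarith
      · have e2 : (q + 1) * m = q * m + m := by ring
        linarith
    omega

theorem pv_F_step (m n x : Int) (hm : 1 ≤ m) (hx : 0 ≤ x) :
    pvF m n (x+1) = pvF m n x + (if PySem.Int.mod x m = 0 ∧ x + m ≤ n then (1:Int) else 0) := by
  have hmpos : (0:Int) < m := by omega
  by_cases hnm : n < m
  · have hcond : ¬ (PySem.Int.mod x m = 0 ∧ x + m ≤ n) := by rintro ⟨_, h2⟩; omega
    simp [pvF, hnm, hcond]
  · push_neg at hnm
    have hF1 : pvF m n (x+1) = PySem.Int.floordiv (min x (n-m)) m + 1 := by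
      unfold pvF
      rw [if_neg (by omega)]
      norm_num
    by_cases hx0 : x = 0
    · subst hx0
      have hcond : PySem.Int.mod 0 m = 0 ∧ (0:Int) + m ≤ n :=
        ⟨by rw [PySem.Int.mod_eq_zero_iff_dvd]; exact dvd_zero m, by omega⟩
      rw [hF1, if_pos hcond]
      have hmin : min (0:Int) (n-m) = 0 := by omega
      rw [hmin]
      have h0 : PySem.Int.floordiv 0 m = 0 := by
        rw [PySem.Int.floordiv_eq_iff_of_pos hmpos]
        constructor
        · simp
        · have e : ((0:Int) + 1) * m = m := by ring
          omega
      rw [h0]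
      have hF0 : pvF m n 0 = 0 := by unfold pvF; rw [if_pos (Or.inl le_rfl)]
      rw [hF0]
    · have hx1 : (1:Int) ≤ x := by omega
      have hF0 : pvF m n x = PySem.Int.floordiv (min (x-1) (n-m)) m + 1 := by
        unfold pvF; rw [if_neg (by omega)]
      by_cases hle : x ≤ n - m
      · have hmin1 : min x (n-m) = x := by omega
        have hmin0 : min (x-1) (n-m) = x - 1 := by omega
        rw [hF1, hF0, hmin1, hmin0, pv_fd_step m x hm]
        by_cases hmod : PySem.Int.mod x m = 0
        · rw [if_pos hmod, if_pos ⟨hmod, by omega⟩]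
        · rw [if_neg hmod, if_neg (by rintro ⟨h1, _⟩; exact hmod h1)]; ring
      · have hgt : n - m < x := by omega
        have hmin1 : min x (n-m) = n - m := by omega
        have hmin0 : min (x-1) (n-m) = n - m := by omega
        have hcond : ¬ (PySem.Int.mod x m = 0 ∧ x + m ≤ n) := by rintro ⟨_, h2⟩; omega
        rw [hF1, hF0, hmin1, hmin0, if_neg hcond]; ring

-- the boundary count below j+1 is exactly A's (merged) group weight of index j
theorem pv_F_w (m n j q1 : Int) (hm : 1 ≤ m)
    (hq1 : q1 = PySem.Int.floordiv (n-1) m + 1) (hj0 : 0 ≤ j) (hjn : j < n) :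
    pvF m n (j+1)
      = (if PySem.Int.mod n m ≠ 0 ∧ PySem.Int.floordiv j m + 1 = q1
         then q1 - 1 else PySem.Int.floordiv j m + 1) := by
  have hmpos : (0:Int) < m := by omega
  have hn1 : (1:Int) ≤ n := by omega
  set d := PySem.Int.floordiv n m with hd
  have hdb : d * m ≤ n ∧ n < (d+1)*m := (PySem.Int.floordiv_eq_iff_of_pos hmpos).mp hd.symm
  have hqr := PySem.Int.floordiv_mul_add_mod n m
  rw [← hd] at hqr
  set r := PySem.Int.mod n m with hrr
  have hr0 : 0 ≤ r := PySem.Int.mod_nonneg n hmpos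
  have hr1 : r < m := PySem.Int.mod_lt n hmpos
  set q := PySem.Int.floordiv j m with hq
  have hqb : q * m ≤ j ∧ j < (q+1)*m := (PySem.Int.floordiv_eq_iff_of_pos hmpos).mp hq.symm
  have hq1m : (q+1)*m = q*m + m := by ring
  have hd1m : (d+1)*m = d*m + m := by ring
  have hdm1 : (d-1)*m = d*m - m := by ring
  have hdn1 : PySem.Int.floordiv (n-1) m = if r = 0 then d - 1 else d := by
    split_ifs with h
    · rw [PySem.Int.floordiv_eq_iff_of_pos hmpos]
      constructor
      · linarith
      · have e2 : (d - 1 + 1) * m = d * m := by ring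
        linarith
    · rw [PySem.Int.floordiv_eq_iff_of_pos hmpos]
      constructor
      · have : 1 ≤ r := by omega
        linarith
      · linarith
  by_cases hnm : n < m
  · have hd0 : d = 0 := by
      have e1 : (1:Int) * m = m := by ring
      have e0 : (0:Int) * m = 0 := by ring
      have h1 : d < 1 := pv_mul_lt m d 1 hmpos (by linarith)
      have h2 : (0:Int) < d + 1 := pv_mul_lt m 0 (d+1) hmpos (by linarith)
      omega
    have hrn : r = n := by
      rw [hd0] at hqr
      omega
    have hq0 : q = 0 := by
      have e1 : (1:Int) * m = m := by ring
      have e0 : (0:Int) * m = 0 := by ring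
      have h1 : q < 1 := pv_mul_lt m q 1 hmpos (by linarith)
      have h2 : (0:Int) < q + 1 := pv_mul_lt m 0 (q+1) hmpos (by linarith)
      omega
    have hrne : r ≠ 0 := by omega
    have hfd : PySem.Int.floordiv (n-1) m = 0 := by rw [hdn1, if_neg hrne]; omega
    rw [if_pos ⟨hrne, by rw [hq1, hfd]; omega⟩, hq1, hfd]
    unfold pvF
    rw [if_pos (Or.inr hnm)]
    omega
  · push_neg at hnm
    have hFv : pvF m n (j+1) = PySem.Int.floordiv (min j (n-m)) m + 1 := by
      unfold pvF
      rw [if_neg (by omega)]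
      norm_num
    by_cases hre : r = 0
    · rw [if_neg (by rintro ⟨h1, _⟩; exact h1 hre)]
      rw [hFv]
      by_cases hle : j ≤ n - m
      · rw [min_eq_left hle, ← hq]
      · have hgt : n - m < j := by omega
        have hfnm : PySem.Int.floordiv (n-m) m = d - 1 := by
          rw [PySem.Int.floordiv_eq_iff_of_pos hmpos]
          have e2 : (d - 1 + 1) * m = d * m := by ring
          constructor <;> linarith
        have hqd : q = d - 1 := by
          have h1 : q < d := pv_mul_lt m q d hmpos (by linarith)
          have h2 : d - 1 < q + 1 := pv_mul_lt m (d-1) (q+1) hmpos (by linarith)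
          omega
        rw [min_eq_right (by omega), hfnm, hqd]
    · rw [hq1, hdn1, if_neg hre]
      by_cases hle : j ≤ n - m
      · have h1 : q < d := pv_mul_lt m q d hmpos (by linarith [hqb.1])
        rw [if_neg (by rintro ⟨_, h2⟩; omega)]
        rw [hFv, min_eq_left hle, ← hq]
      · have hgt : n - m < j := by omega
        have hfnm : PySem.Int.floordiv (n-m) m = d - 1 := by
          rw [PySem.Int.floordiv_eq_iff_of_pos hmpos]
          have e2 : (d - 1 + 1) * m = d * m := by ring
          constructor <;> linarith
        rw [hFv, min_eq_right (by omega), hfnm]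
        have hql : d - 1 ≤ q := by
          have h2 : d - 1 < q + 1 := pv_mul_lt m (d-1) (q+1) hmpos (by linarith [hqb.2])
          omega
        have hqu : q ≤ d := by
          have h2 : q < d + 1 := pv_mul_lt m q (d+1) hmpos (by linarith [hqb.1])
          omega
        by_cases hqd : q = d
        · rw [if_pos ⟨hre, by omega⟩]; omega
        · rw [if_neg (by rintro ⟨_, h2⟩; omega)]; omega

theorem pv_U_F (s : List Int) (m n : Int) (hm : 1 ≤ m) :
    ∀ (fuel : Nat) (x : Int), 0 ≤ x → (n - x).toNat ≤ fuel →
    pvU s m n (PySem.List.pyRange x n 1) (pvF m n x)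
      = ((PySem.List.pyRange x n 1).map
          (fun j => pvF m n (j+1) * PySem.List.pyGetD s j 0)).sum := by
  intro fuel
  induction fuel with
  | zero =>
    intro x hx hf
    rw [PySem.List.pyRange_one_eq_nil (by omega)]
    simp [pvU]
  | succ f ih =>
    intro x hx hf
    by_cases hnx : n ≤ x
    · rw [PySem.List.pyRange_one_eq_nil hnx]
      simp [pvU]
    · have hxn : x < n := by omega
      rw [PySem.List.pyRange_one_cons hxn]
      simp only [pvU, List.map_cons, List.sum_cons]
      rw [← pv_F_step m n x hm hx]
      rw [ih (x+1) (by omega) (by omega)]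

-- ===== VERDICT (by name: the statement is the Claim_ definition above) =====
theorem maxScore_spec : Claim_equal_maxScore := by
  intro a m _ hpre
  have hm1 : (1:Int) ≤ m := hpre
  have hmpos : (0:Int) < m := by omega
  unfold Spec_maxScore
  simp only [maxScore, maxScore_alt]
  generalize (PySem.List.sorted a fun x => x) = s
  rcases eq_or_ne s [] with rfl | hsne
  · -- empty list: every group is empty, both scores are 0
    simp only [PySem.List.len_eq, List.length_nil, Nat.cast_zero]
    rw [PySem.List.pyRange_one_eq_nil (by omega)]
    rw [PySem.List.pyRange_neg_one_eq_nil (by omega)]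
    simp only [List.foldl_nil, List.map_nil]
    split_ifs with h
    · simp [PySem.Dict.erase, PySem.Dict.modify, PySem.Dict.insert, PySem.Dict.setdefault,
        PySem.Dict.getD, PySem.Dict.get?, PySem.Dict.contains, PySem.Dict.empty]
    · simp [PySem.Dict.setdefault, PySem.Dict.empty]
  -- non-empty list
  have hn0 : 0 < PySem.List.len s := by
    rw [PySem.List.len_eq]
    exact_mod_cast List.length_pos_of_ne_nil hsne
  set n : Int := PySem.List.len s with hn
  clear_value n
  clear hsne
  set r := PySem.List.pyRange 0 n with hr
  set q1 : Int := PySem.Int.floordiv (n - 1) m + 1 with hq1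
  set D := r.foldl (fun d i => d.modify (PySem.Int.floordiv i m + 1) [] fun g =>
      g ++ [PySem.List.pyGetD s i 0]) PySem.Dict.empty with hD
  have hD' : D = (r.map (fun j => (PySem.Int.floordiv j m + 1, PySem.List.pyGetD s j 0))).foldl
      (fun d p => d.modify p.1 [] fun g => g ++ [p.2]) PySem.Dict.empty := by
    rw [hD, List.foldl_map]
  have hkeys : D.keys = PySem.Set.ofList (r.map (fun j => PySem.Int.floordiv j m + 1)) := by
    rw [hD', PySem.Dict.keys_foldl_modify_key _ Prod.fst [] (fun _ p g => g ++ [p.2]),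
      PySem.Dict.keys_empty, PySem.Set.update_nil_left, List.map_map]
    rfl
  have hnodD : D.keys.Nodup := by
    rw [hD']
    exact PySem.Dict.nodup_keys_foldl_modify_key _ Prod.fst [] (fun _ p g => g ++ [p.2])
      PySem.Dict.empty PySem.Dict.nodup_keys_empty
  have hgetD : ∀ c, D.getD c [] = (r.filter (fun j => PySem.Int.floordiv j m + 1 == c)).map
      (fun j => PySem.List.pyGetD s j 0) := by
    intro c
    rw [hD', PySem.Dict.getD_foldl_modify_append _ PySem.Dict.empty c,
      PySem.Dict.getD_empty, List.filter_map, List.map_map]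
    simp [Function.comp_def]
  have hfsum : pvFsum D = (r.map (fun j =>
      (PySem.Int.floordiv j m + 1) * PySem.List.pyGetD s j 0)).sum := by
    rw [hD', pv_fsum_fold _ PySem.Dict.empty PySem.Dict.nodup_keys_empty]
    have h0 : pvFsum PySem.Dict.empty = 0 := by simp [pvFsum, PySem.Dict.empty]
    rw [h0, List.map_map]
    simp [Function.comp_def]
  have hcont : D.contains q1 = true := by
    rw [PySem.Dict.contains_eq_decide_mem_keys, hkeys]
    simp only [decide_eq_true_eq, PySem.Set.mem_ofList, List.mem_map]
    exact ⟨n - 1, by rw [hr]; exact PySem.List.mem_pyRange_one.mpr (by omega), by rw [hq1]⟩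
  rw [PySem.Dict.setdefault_of_contains D [] hcont, hgetD q1]
  -- B's side: reverse sweep = Σ_j pvF(j+1) * s[j]
  have hBrev : PySem.List.pyRange (n - 1) (-1) (-1) = r.reverse := by
    rw [PySem.List.pyRange_neg_one_eq_reverse, hr]
    norm_num
  have hB : ((PySem.List.pyRange (n - 1) (-1) (-1)).foldl
      (fun p i =>
        (p.1 + PySem.List.pyGetD s i 0,
         if PySem.Int.mod i m = 0 ∧ i + m ≤ n then p.2 + (p.1 + PySem.List.pyGetD s i 0) else p.2))
      (0, 0)).2
      = (r.map (fun j => pvF m n (j+1) * PySem.List.pyGetD s j 0)).sum := by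
    rw [hBrev, pv_fold_rev s m n r 0 0]
    have hWU : pvW s m n r 0 = pvU s m n r 0 := by rw [pv_U_eq]; ring
    have hF0 : pvF m n 0 = 0 := by unfold pvF; rw [if_pos (Or.inl le_rfl)]
    have := pv_U_F s m n hm1 (n - 0).toNat 0 le_rfl le_rfl
    rw [hF0] at this
    simp only [hr]
    rw [show ((0:Int) + pvW s m n (PySem.List.pyRange 0 n) 0) = pvW s m n (PySem.List.pyRange 0 n) 0 by ring]
    rw [hWU, this]
  rw [hB]
  -- rewrite B's sum elementwise into A's merged-weight form
  have hmid : (r.map (fun j => pvF m n (j+1) * PySem.List.pyGetD s j 0)).sum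
      = (r.map (fun j =>
          (if PySem.Int.mod n m ≠ 0 ∧ PySem.Int.floordiv j m + 1 = q1
           then q1 - 1 else PySem.Int.floordiv j m + 1) * PySem.List.pyGetD s j 0)).sum := by
    apply congrArg
    apply List.map_congr_left
    intro j hj
    have hjb := PySem.List.mem_pyRange_one.mp (by rw [hr] at hj; exact hj)
    rw [pv_F_w m n j q1 hm1 hq1 hjb.1 hjb.2]
  rw [hmid]
  congr 1
  have hpv : ∀ d : PySem.Dict Int (List Int),
      d.items.foldl (fun sc it => sc + it.1 * it.2.sum) 0 = pvFsum d := by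
    intro d
    unfold pvFsum
    rw [PySem.List.foldl_add]
    simp
  split_ifs with hcLt
  · -- merge branch: the trailing group is partial, its elements move to weight q1 - 1
    have hbr : PySem.Int.floordiv (n-1) m * m ≤ n - 1
        ∧ n - 1 < (PySem.Int.floordiv (n-1) m + 1) * m :=
      (PySem.Int.floordiv_eq_iff_of_pos hmpos).mp rfl
    have hq0 : 0 ≤ PySem.Int.floordiv (n-1) m * m := by
      have h0 : 0 ≤ PySem.Int.floordiv (n-1) m := by
        rw [PySem.Int.le_floordiv_iff_mul_le hmpos]; omega
      positivity
    have hfilter : r.filter (fun j => PySem.Int.floordiv j m + 1 == q1)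
        = PySem.List.pyRange (PySem.Int.floordiv (n-1) m * m) n := by
      rw [hr, PySem.List.pyRange_one_append 0 (PySem.Int.floordiv (n-1) m * m) n hq0 (by omega),
        List.filter_append]
      have h1 : (PySem.List.pyRange 0 (PySem.Int.floordiv (n-1) m * m)).filter
          (fun j => PySem.Int.floordiv j m + 1 == q1) = [] := by
        apply List.filter_eq_nil_iff.mpr
        intro j hj
        have hjm := PySem.List.mem_pyRange_one.mp hj
        have : PySem.Int.floordiv j m < PySem.Int.floordiv (n-1) m :=
          (PySem.Int.floordiv_lt_iff_lt_mul hmpos).mpr hjm.2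
        simp only [hq1, beq_iff_eq]
        omega
      have h2 : (PySem.List.pyRange (PySem.Int.floordiv (n-1) m * m) n).filter
            (fun j => PySem.Int.floordiv j m + 1 == q1)
          = PySem.List.pyRange (PySem.Int.floordiv (n-1) m * m) n := by
        apply List.filter_eq_self.mpr
        intro j hj
        have hjm := PySem.List.mem_pyRange_one.mp hj
        have : PySem.Int.floordiv j m = PySem.Int.floordiv (n-1) m :=
          (PySem.Int.floordiv_eq_iff_of_pos hmpos).mpr ⟨hjm.1, by omega⟩
        simp only [hq1, beq_iff_eq]
        omega
      rw [h1, h2, List.nil_append]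
    have hlenInt : ((((r.filter (fun j => PySem.Int.floordiv j m + 1 == q1)).map
        (fun j => PySem.List.pyGetD s j 0)).length : Int))
        = n - PySem.Int.floordiv (n-1) m * m := by
      rw [hfilter, List.length_map, PySem.List.length_pyRange_one]
      omega
    have hmodne : PySem.Int.mod n m ≠ 0 := by
      apply (pv_cond_arith n m hmpos).mp
      omega
    -- A's score
    have hgetM : (D.modify (q1 - 1) [] fun g => g ++ ((r.filter
          (fun j => PySem.Int.floordiv j m + 1 == q1)).map
          (fun j => PySem.List.pyGetD s j 0))).getD q1 []
        = D.getD q1 [] := PySem.Dict.getD_modify_of_ne D [] _ (by omega)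
    rw [hpv, pv_fsum_erase _ (pv_nodup_modify hnodD _ _ _) q1, hgetM, hgetD q1,
      pv_fsum_modify_append D hnodD (q1 - 1) _, hfsum]
    -- the merged-weight sum, split into the plain sum minus the demoted tail
    have hBmap : (r.map (fun j =>
          (if PySem.Int.mod n m ≠ 0 ∧ PySem.Int.floordiv j m + 1 = q1
           then q1 - 1 else PySem.Int.floordiv j m + 1) * PySem.List.pyGetD s j 0)).sum
        = (r.map (fun j => if PySem.Int.floordiv j m + 1 = q1
            then (PySem.Int.floordiv j m + 1) * PySem.List.pyGetD s j 0 - PySem.List.pyGetD s j 0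
            else (PySem.Int.floordiv j m + 1) * PySem.List.pyGetD s j 0)).sum := by
      apply congrArg
      apply List.map_congr_left
      intro j _
      by_cases h : PySem.Int.floordiv j m + 1 = q1
      · rw [if_pos ⟨hmodne, h⟩, if_pos h, h]; ring
      · rw [if_neg (by rintro ⟨_, h2⟩; exact h h2), if_neg h]
    rw [hBmap, pv_sum_map_ite_sub r (fun j => PySem.Int.floordiv j m + 1 = q1)
      (fun j => (PySem.Int.floordiv j m + 1) * PySem.List.pyGetD s j 0)
      (fun j => PySem.List.pyGetD s j 0)]
    have hfilter' : r.filter (fun j => decide (PySem.Int.floordiv j m + 1 = q1))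
        = r.filter (fun j => PySem.Int.floordiv j m + 1 == q1) := by
      apply List.filter_congr
      intro j _
      rfl
    rw [hfilter']
    ring
  · -- no merge: every weight is i//m + 1 on both sides
    have hbr : PySem.Int.floordiv (n-1) m * m ≤ n - 1
        ∧ n - 1 < (PySem.Int.floordiv (n-1) m + 1) * m :=
      (PySem.Int.floordiv_eq_iff_of_pos hmpos).mp rfl
    have hq0 : 0 ≤ PySem.Int.floordiv (n-1) m * m := by
      have h0 : 0 ≤ PySem.Int.floordiv (n-1) m := by
        rw [PySem.Int.le_floordiv_iff_mul_le hmpos]; omega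
      positivity
    have hfilter : r.filter (fun j => PySem.Int.floordiv j m + 1 == q1)
        = PySem.List.pyRange (PySem.Int.floordiv (n-1) m * m) n := by
      rw [hr, PySem.List.pyRange_one_append 0 (PySem.Int.floordiv (n-1) m * m) n hq0
        (by omega), List.filter_append]
      have h1 : (PySem.List.pyRange 0 (PySem.Int.floordiv (n-1) m * m)).filter
          (fun j => PySem.Int.floordiv j m + 1 == q1) = [] := by
        apply List.filter_eq_nil_iff.mpr
        intro j hj
        have hjm := PySem.List.mem_pyRange_one.mp hj
        have : PySem.Int.floordiv j m < PySem.Int.floordiv (n-1) m :=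
          (PySem.Int.floordiv_lt_iff_lt_mul hmpos).mpr hjm.2
        simp only [hq1, beq_iff_eq]
        omega
      have h2 : (PySem.List.pyRange (PySem.Int.floordiv (n-1) m * m) n).filter
            (fun j => PySem.Int.floordiv j m + 1 == q1)
          = PySem.List.pyRange (PySem.Int.floordiv (n-1) m * m) n := by
        apply List.filter_eq_self.mpr
        intro j hj
        have hjm := PySem.List.mem_pyRange_one.mp hj
        have : PySem.Int.floordiv j m = PySem.Int.floordiv (n-1) m :=
          (PySem.Int.floordiv_eq_iff_of_pos hmpos).mpr ⟨hjm.1, by omega⟩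
        simp only [hq1, beq_iff_eq]
        omega
      rw [h1, h2, List.nil_append]
    have hlenInt : ((((r.filter (fun j => PySem.Int.floordiv j m + 1 == q1)).map
        (fun j => PySem.List.pyGetD s j 0)).length : Int))
        = n - PySem.Int.floordiv (n-1) m * m := by
      rw [hfilter, List.length_map, PySem.List.length_pyRange_one]
      omega
    have hmod0 : PySem.Int.mod n m = 0 := by
      by_contra hne
      have := (pv_cond_arith n m hmpos).mpr hne
      omega
    rw [hpv, hfsum]
    apply congrArg
    apply List.map_congr_left
    intro j _
    rw [if_neg (by rintro ⟨h1, _⟩; exact h1 hmod0)]
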